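-- pv_equiv track=rewrite | github.com/yannickloth/W33-Theory | tools/find_schlafli_embedding_in_w33.py | canonical_point
-- ===== SOURCE A (Python) =====
-- def canonical_point(v):
--     v = tuple(int(x % 3) for x in v)
--     if not any(v):
--         return None
--     for i in range(4):
--         if v[i] != 0:
--             inv = 1 if v[i] == 1 else 2
--             return tuple((inv * x) % 3 for x in v)
--     raise RuntimeError()
-- ===== SOURCE B (Python) =====
-- def canonical_point(v):
--     w = tuple(int(x % 3) for x in v)
--     if not any(w):
--         return None
--     if not any(w[:4]):
--         raise RuntimeError()
--     # first nonzero of exactly one of {w, 2*w mod 3} is 1, and that one is lex-smaller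
--     return min(w, tuple((2 * x) % 3 for x in w))
-- ===== Notes on version B (the rewrite author's own statement) =====
-- stated objective: simpler
-- what changed: Replaces the positional scan for the first nonzero coordinate (and the branch computing its inverse mod 3) by taking the lexicographic minimum of the two scalar multiples of the reduced vector, whose leading nonzero entries are 1 and 2 respectively.
import Mathlib
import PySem

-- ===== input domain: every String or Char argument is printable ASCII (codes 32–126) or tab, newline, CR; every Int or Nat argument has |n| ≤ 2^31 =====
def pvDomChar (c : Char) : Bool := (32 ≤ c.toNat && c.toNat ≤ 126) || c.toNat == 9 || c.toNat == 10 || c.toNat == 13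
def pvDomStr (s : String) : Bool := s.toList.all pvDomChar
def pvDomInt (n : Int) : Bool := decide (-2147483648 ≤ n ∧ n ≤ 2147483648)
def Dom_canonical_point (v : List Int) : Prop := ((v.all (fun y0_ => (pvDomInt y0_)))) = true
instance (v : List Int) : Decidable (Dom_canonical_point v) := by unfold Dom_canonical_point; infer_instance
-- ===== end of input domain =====

-- B replaces A's positional first-nonzero scan by a lexicographic min of the two mod-3 scalar
-- multiples of the reduced vector (objective: simpler); like A it raises on malformed vectors
-- whose first nonzero lies beyond index 3 (those inputs are outside Pre_).

-- ===== PORT A =====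
-- the 'for i in range(4)' loop of A; none = the raise paths (IndexError/RuntimeError), excluded by Pre_
def cpA_loop (w : List Int) : List Int → Option (List Int)
  | [] => none
  | i :: rest =>
    match PySem.List.pyGet? w i with
    | none => none
    | some x =>
      if x ≠ 0 then
        some (w.map (fun y => PySem.Int.mod ((if x = 1 then (1 : Int) else 2) * y) 3))
      else cpA_loop w rest

def canonical_point (v : List Int) : Option (List Int) :=
  let w := v.map (fun x => PySem.Int.mod x 3)
  if (w.any (fun x => x ≠ 0)) = false then none
  else cpA_loop w (PySem.List.pyRange 0 4 1)

-- ===== PORT B =====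
-- Python tuple '<' (equal-length case never reaches the length tie-break asymmetrically here)
def cpTupLt : List Int → List Int → Bool
  | _, [] => false
  | [], _ :: _ => true
  | a :: as_, b :: bs => a < b || (a == b && cpTupLt as_ bs)

-- Python min(a, b): keeps the first argument on ties
def cpMin (a b : List Int) : List Int := if cpTupLt b a then b else a

def canonical_point_alt (v : List Int) : Option (List Int) :=
  let w := v.map (fun x => PySem.Int.mod x 3)
  if (w.any (fun x => x ≠ 0)) = false then none
  else if ((w.take 4).any (fun x => x ≠ 0)) = false then none  -- B's 'raise RuntimeError()' path
  else some (cpMin w (w.map (fun x => PySem.Int.mod (2 * x) 3)))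

-- ===== PRECONDITION & SPEC =====
-- Pre_ excludes exactly the inputs on which A (and B) raise RuntimeError: some entry is nonzero
-- mod 3 but none of the first four is (only possible for length ≥ 5).
def Pre_canonical_point (v : List Int) : Prop :=
  ((v.take 4).any (fun x => PySem.Int.mod x 3 ≠ 0)) = true ∨
  (v.all (fun x => PySem.Int.mod x 3 = 0)) = true
instance (v : List Int) : Decidable (Pre_canonical_point v) := by
  unfold Pre_canonical_point; infer_instance

def pvWitness_canonical_point : List Int := [2, 4, -1, 0]

def Spec_canonical_point (v : List Int) (out : Option (List Int)) : Prop :=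
  out = canonical_point_alt v
instance (v : List Int) (out : Option (List Int)) : Decidable (Spec_canonical_point v out) := by
  unfold Spec_canonical_point; infer_instance

-- ===== CLAIM (what is proved, stated in full; the proofs are below) =====
def Claim_equal_canonical_point : Prop := ∀ (v : List Int), Dom_canonical_point v →
  Pre_canonical_point v → Spec_canonical_point v (canonical_point v)

-- ===== LEMMAS AND PROOFS =====

lemma cp_m3_mem (x : Int) : PySem.Int.mod x 3 = 0 ∨ PySem.Int.mod x 3 = 1 ∨ PySem.Int.mod x 3 = 2 := by
  rw [PySem.Int.mod_eq_emod_of_pos (a := x) (b := 3) (by norm_num)]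
  have h1 : 0 ≤ x % 3 := Int.emod_nonneg x (by norm_num)
  have h2 : x % 3 < 3 := Int.emod_lt_of_pos x (by norm_num)
  omega

lemma cp_fmod_fix {y : Int} (h : y = 0 ∨ y = 1 ∨ y = 2) : y.fmod 3 = y := by
  rcases h with h | h | h <;> subst h <;> decide

lemma cp_map_fmod (t : List Int) (ht : ∀ y ∈ t, y = 0 ∨ y = 1 ∨ y = 2) :
    t.map (fun y => y.fmod 3) = t := by
  have := List.map_congr_left (l := t) (f := fun y => y.fmod 3) (g := id)
    (fun y hy => cp_fmod_fix (ht y hy))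
  simpa using this

-- decomposition of the reduced vector at its first nonzero entry, which Pre_ puts among the first 4
lemma cp_decomp (w : List Int) (hw : ∀ y ∈ w, y = 0 ∨ y = 1 ∨ y = 2)
    (h : ((w.take 4).any (fun x => x ≠ 0)) = true) :
    ∃ z x t, w = z ++ x :: t ∧ z.length ≤ 3 ∧ (∀ y ∈ z, y = (0 : Int)) ∧ (x = 1 ∨ x = 2) := by
  match w, hw, h with
  | a :: w1, hw, h =>
    by_cases ha : a = 0
    · subst ha
      match w1, h with
      | b :: w2, h =>
        by_cases hb : b = 0
        · subst hb
          match w2, h with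
          | c :: w3, h =>
            by_cases hc : c = 0
            · subst hc
              match w3, h with
              | d :: w4, h =>
                by_cases hd : d = 0
                · exfalso; subst hd; simp [List.take, List.any] at h
                · refine ⟨[0, 0, 0], d, w4, by simp, by simp, by simp, ?_⟩
                  have := hw d (by simp); tauto
              | [], h => exact absurd h (by simp)
            · refine ⟨[0, 0], c, w3, by simp, by simp, by simp, ?_⟩
              have := hw c (by simp); tauto
          | [], h => exact absurd h (by simp)
        · refine ⟨[0], b, w2, by simp, by simp, by simp, ?_⟩
          have := hw b (by simp); tauto
      | [], h => exact absurd h (by simp)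
    · refine ⟨[], a, w1, by simp, by simp, by simp, ?_⟩
      have := hw a (by simp); tauto
  | [], _, h => exact absurd h (by simp)

lemma cp_get1 (a b : Int) (l : List Int) : PySem.List.pyGet? (a :: b :: l) 1 = some b := by
  simp [PySem.List.pyGet?_cons_succ (x := a) (xs := b :: l) (n := 0)]

lemma cp_get2 (a b c : Int) (l : List Int) : PySem.List.pyGet? (a :: b :: c :: l) 2 = some c := by
  have h := PySem.List.pyGet?_cons_succ (x := a) (xs := b :: c :: l) (n := 1)
  norm_num at h
  exact h

lemma cp_get3 (a b c d : Int) (l : List Int) : PySem.List.pyGet? (a :: b :: c :: d :: l) 3 = some d := by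
  have h := PySem.List.pyGet?_cons_succ (x := a) (xs := b :: c :: d :: l) (n := 2)
  norm_num at h
  rw [h, cp_get2]

lemma cp_main (w : List Int) (hw : ∀ y ∈ w, y = 0 ∨ y = 1 ∨ y = 2)
    (z : List Int) (x : Int) (t : List Int) (hww : w = z ++ x :: t)
    (hlen : z.length ≤ 3) (hz : ∀ y ∈ z, y = (0 : Int)) (hx : x = 1 ∨ x = 2) :
    cpA_loop w (PySem.List.pyRange 0 4 1) =
      some (cpMin w (w.map (fun y => PySem.Int.mod (2 * y) 3))) := by
  have hzcases : z = [] ∨ z = [0] ∨ z = [0, 0] ∨ z = [0, 0, 0] := by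
    match z, hlen, hz with
    | [], _, _ => tauto
    | [a], _, hz => have := hz a (by simp); subst this; tauto
    | [a, b], _, hz =>
      have ha := hz a (by simp); have hb := hz b (by simp); subst ha; subst hb; tauto
    | [a, b, c], _, hz =>
      have ha := hz a (by simp); have hb := hz b (by simp); have hc := hz c (by simp)
      subst ha; subst hb; subst hc; tauto
    | _ :: _ :: _ :: _ :: _, hlen, _ => exact absurd hlen (by simp)
  have hrange : PySem.List.pyRange 0 4 1 = [0, 1, 2, 3] := by decide
  have hwmem : ∀ y ∈ t, y = 0 ∨ y = 1 ∨ y = 2 := by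
    intro y hy; exact hw y (by simp [hww, hy])
  rcases hzcases with hzc | hzc | hzc | hzc <;> subst hzc <;> subst hww <;>
    rcases hx with hx | hx <;> subst hx <;>
    simp [hrange, cpA_loop, PySem.List.pyGet?_zero_cons, cp_get1, cp_get2, cp_get3, cpMin, cpTupLt,
      PySem.Int.mod] <;>
    try simp [cp_map_fmod _ hwmem]

-- ===== VERDICT (by name: the statement is the Claim_ definition above) =====
theorem canonical_point_spec : Claim_equal_canonical_point := by
  intro v _ hpre
  unfold Spec_canonical_point canonical_point canonical_point_alt
  set w := v.map (fun x => PySem.Int.mod x 3) with hwdef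
  have hw : ∀ y ∈ w, y = 0 ∨ y = 1 ∨ y = 2 := by
    intro y hy; rw [hwdef] at hy
    rcases List.mem_map.1 hy with ⟨x, _, rfl⟩; exact cp_m3_mem x
  by_cases hany : (w.any (fun x => x ≠ 0)) = false
  · rw [if_pos hany, if_pos hany]
  · rw [if_neg hany, if_neg hany]
    have hpre' : ((w.take 4).any (fun x => x ≠ 0)) = true := by
      rcases hpre with h | h
      · rw [hwdef, ← List.map_take, List.any_map]
        simpa using h
      · exfalso; apply hany
        rw [hwdef, List.any_map]
        simp only [List.any_eq_false]
        intro x hx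
        simpa using List.all_eq_true.1 h x hx
    rw [if_neg (by simp only [hpre']; decide)]
    obtain ⟨z, x, t, hww, hlen, hz, hx⟩ := cp_decomp w hw hpre'
    exact cp_main w hw z x t hww hlen hz hx
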